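-- pv_equiv track=rewrite | github.com/Nikolis2002/predicting_alzheimers | deep_results.py | get_strategy
-- ===== SOURCE A (Python) =====
-- def get_strategy(neurons):
--     if all(x > y for x, y in zip(neurons, neurons[1:])):
--         return "pyramid"
--     elif all(x < y for x, y in zip(neurons, neurons[1:])):
--         return "inverted"
--     elif all(x == y for x, y in zip(neurons, neurons[1:])):
--         return "flat"
--     elif len(neurons) == 3 and neurons[0] < neurons[1] > neurons[2] and neurons[0] != neurons[2]:
--         return "sandwich"
--     else:
--         return "irregular"
-- ===== SOURCE B (Python) =====
-- def get_strategy(neurons):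
--     # One pass over adjacent pairs collecting which comparison signs occur,
--     # then classify from those flags (empty -> "pyramid", matching all([])).
--     has_gt = has_lt = has_eq = False
--     for x, y in zip(neurons, neurons[1:]):
--         if x > y:
--             has_gt = True
--         elif x < y:
--             has_lt = True
--         else:
--             has_eq = True
--     if not (has_lt or has_eq):
--         return "pyramid"
--     if not (has_gt or has_eq):
--         return "inverted"
--     if not (has_gt or has_lt):
--         return "flat"
--     if len(neurons) == 3 and neurons[0] < neurons[1] > neurons[2] and neurons[0] != neurons[2]:
--         return "sandwich"
--     return "irregular"
-- ===== Notes on version B (the rewrite author's own statement) =====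
-- stated objective: alternative
-- what changed: Replaces A's three separate scans of adjacent pairs (one per generator-all) by a single pass that records which comparison signs occur and classifies from those flags.
import Mathlib
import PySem

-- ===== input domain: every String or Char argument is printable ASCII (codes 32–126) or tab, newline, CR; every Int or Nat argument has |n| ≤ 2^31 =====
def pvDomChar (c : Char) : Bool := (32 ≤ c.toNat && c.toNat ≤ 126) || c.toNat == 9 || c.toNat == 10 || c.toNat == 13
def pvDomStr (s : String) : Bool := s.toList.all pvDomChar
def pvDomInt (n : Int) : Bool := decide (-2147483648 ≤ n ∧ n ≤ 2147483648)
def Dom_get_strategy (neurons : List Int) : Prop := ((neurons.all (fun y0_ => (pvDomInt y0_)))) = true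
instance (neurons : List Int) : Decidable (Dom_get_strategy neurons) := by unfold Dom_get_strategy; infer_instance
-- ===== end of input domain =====

-- B replaces A's three separate scans over adjacent pairs by one pass collecting
-- which comparison signs occur, then classifies from those flags (objective: alternative).

-- ===== PORT A =====
def get_strategy (neurons : List Int) : String :=
  if (neurons.zip (PySem.List.slice neurons (some 1) none)).all (fun p => decide (p.1 > p.2)) then
    "pyramid"
  else if (neurons.zip (PySem.List.slice neurons (some 1) none)).all (fun p => decide (p.1 < p.2)) then
    "inverted"
  else if (neurons.zip (PySem.List.slice neurons (some 1) none)).all (fun p => decide (p.1 = p.2)) then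
    "flat"
  else if neurons.length = 3 ∧
      ((PySem.List.pyGet? neurons 0).getD 0 < (PySem.List.pyGet? neurons 1).getD 0 ∧
       (PySem.List.pyGet? neurons 1).getD 0 > (PySem.List.pyGet? neurons 2).getD 0) ∧
      (PySem.List.pyGet? neurons 0).getD 0 ≠ (PySem.List.pyGet? neurons 2).getD 0 then
    "sandwich"
  else
    "irregular"

-- ===== PORT B =====
-- one step of B's loop: set the flag for the sign of the current adjacent pair
def pvStep (acc : Bool × Bool × Bool) (p : Int × Int) : Bool × Bool × Bool :=
  if p.1 > p.2 then (true, acc.2.1, acc.2.2)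
  else if p.1 < p.2 then (acc.1, true, acc.2.2)
  else (acc.1, acc.2.1, true)

def get_strategy_alt (neurons : List Int) : String :=
  let s := (neurons.zip (PySem.List.slice neurons (some 1) none)).foldl pvStep (false, false, false)
  if !(s.2.1 || s.2.2) then "pyramid"
  else if !(s.1 || s.2.2) then "inverted"
  else if !(s.1 || s.2.1) then "flat"
  else if neurons.length = 3 ∧
      ((PySem.List.pyGet? neurons 0).getD 0 < (PySem.List.pyGet? neurons 1).getD 0 ∧
       (PySem.List.pyGet? neurons 1).getD 0 > (PySem.List.pyGet? neurons 2).getD 0) ∧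
      (PySem.List.pyGet? neurons 0).getD 0 ≠ (PySem.List.pyGet? neurons 2).getD 0 then
    "sandwich"
  else
    "irregular"

-- ===== PRECONDITION & SPEC =====
def Spec_get_strategy (neurons : List Int) (out : String) : Prop := out = get_strategy_alt neurons
instance (neurons : List Int) (out : String) : Decidable (Spec_get_strategy neurons out) := by unfold Spec_get_strategy; infer_instance

-- ===== CLAIM (what is proved, stated in full; the proofs are below) =====
def Claim_equal_get_strategy : Prop := ∀ (neurons : List Int), Dom_get_strategy neurons → Spec_get_strategy neurons (get_strategy neurons)

-- ===== LEMMAS AND PROOFS =====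

-- the fold computes, in each component, whether some pair has that sign
lemma pvFold_flags (l : List (Int × Int)) (a b c : Bool) :
    l.foldl pvStep (a, b, c) =
      (a || l.any (fun p => decide (p.1 > p.2)),
       b || l.any (fun p => decide (p.1 < p.2)),
       c || l.any (fun p => decide (¬ p.1 > p.2 ∧ ¬ p.1 < p.2))) := by
  induction l generalizing a b c with
  | nil => simp
  | cons p t ih =>
    simp only [List.foldl_cons, List.any_cons, pvStep]
    split_ifs with h1 h2
    · have hlt : ¬ p.1 < p.2 := by omega
      rw [ih]; simp [h1, hlt]
    · rw [ih]; simp [h1, h2]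
    · rw [ih]; simp [h1, h2]

lemma pvNoLtEq (l : List (Int × Int)) :
    (!(l.any (fun p => decide (p.1 < p.2)) || l.any (fun p => decide (¬ p.1 > p.2 ∧ ¬ p.1 < p.2)))) =
    l.all (fun p => decide (p.1 > p.2)) := by
  rw [Bool.eq_iff_iff]
  simp only [Bool.not_eq_eq_eq_not, Bool.not_true, Bool.or_eq_false_iff,
    List.any_eq_false, List.all_eq_true, decide_eq_true_eq]
  constructor
  · rintro ⟨h1, h2⟩ p hp
    have := h1 p hp; have := h2 p hp; omega
  · intro h
    exact ⟨fun p hp => by have := h p hp; omega, fun p hp => by have := h p hp; omega⟩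

lemma pvNoGtEq (l : List (Int × Int)) :
    (!(l.any (fun p => decide (p.1 > p.2)) || l.any (fun p => decide (¬ p.1 > p.2 ∧ ¬ p.1 < p.2)))) =
    l.all (fun p => decide (p.1 < p.2)) := by
  rw [Bool.eq_iff_iff]
  simp only [Bool.not_eq_eq_eq_not, Bool.not_true, Bool.or_eq_false_iff,
    List.any_eq_false, List.all_eq_true, decide_eq_true_eq]
  constructor
  · rintro ⟨h1, h2⟩ p hp
    have := h1 p hp; have := h2 p hp; omega
  · intro h
    exact ⟨fun p hp => by have := h p hp; omega, fun p hp => by have := h p hp; omega⟩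

lemma pvNoGtLt (l : List (Int × Int)) :
    (!(l.any (fun p => decide (p.1 > p.2)) || l.any (fun p => decide (p.1 < p.2)))) =
    l.all (fun p => decide (p.1 = p.2)) := by
  rw [Bool.eq_iff_iff]
  simp only [Bool.not_eq_eq_eq_not, Bool.not_true, Bool.or_eq_false_iff,
    List.any_eq_false, List.all_eq_true, decide_eq_true_eq]
  constructor
  · rintro ⟨h1, h2⟩ p hp
    have := h1 p hp; have := h2 p hp; omega
  · intro h
    exact ⟨fun p hp => by have := h p hp; omega, fun p hp => by have := h p hp; omega⟩

-- ===== VERDICT (by name: the statement is the Claim_ definition above) =====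
theorem get_strategy_spec : Claim_equal_get_strategy := by
  intro neurons _
  unfold Spec_get_strategy get_strategy get_strategy_alt
  rw [pvFold_flags]
  simp only [Bool.false_or]
  rw [pvNoLtEq, pvNoGtEq, pvNoGtLt]
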